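-- pv_equiv track=rewrite | github.com/Umarchen/openclaw-agent-dashboard | src/backend/data/timeline_reader.py | _extract_task_content
-- ===== SOURCE A (Python) =====
-- def _extract_task_content(text: str) -> str:
--     """从主 Agent 发给子 Agent 的消息中提取任务内容"""
--     lines = text.split('\n')
--     task_lines = []
--     for line in lines:
--         if 'session_key:' in line.lower():
--             continue
--         if line.strip().startswith('---'):
--             continue
--         if line.strip().startswith('CONTEXT FILES'):
--             break
--         if line.strip().startswith('WORKING DIRECTORY'):
--             break
--         if line.strip().startswith('SYSTEM INFO'):
--             break
--         task_lines.append(line)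
--     return '\n'.join(task_lines).strip()
-- ===== SOURCE B (Python) =====
-- def _extract_task_content(text: str) -> str:
--     lines = text.split('\n')
--
--     def skipped(line):
--         return 'session_key:' in line.lower() or line.strip().startswith('---')
--
--     def marker(line):
--         s = line.strip()
--         return (s.startswith('CONTEXT FILES')
--                 or s.startswith('WORKING DIRECTORY')
--                 or s.startswith('SYSTEM INFO'))
--
--     cutoff = next((i for i, line in enumerate(lines)
--                    if marker(line) and not skipped(line)), len(lines))
--     kept = [line for line in lines[:cutoff] if not skipped(line)]
--     return '\n'.join(kept).strip()
-- ===== Notes on version B (the rewrite author's own statement) =====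
-- stated objective: alternative
-- what changed: Replaced the interleaved continue/break loop by a two-phase computation: first find the cutoff index of the first non-skipped marker header with next() over enumerate, then filter the skipped lines out of the prefix slice with a comprehension.
import Mathlib
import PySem

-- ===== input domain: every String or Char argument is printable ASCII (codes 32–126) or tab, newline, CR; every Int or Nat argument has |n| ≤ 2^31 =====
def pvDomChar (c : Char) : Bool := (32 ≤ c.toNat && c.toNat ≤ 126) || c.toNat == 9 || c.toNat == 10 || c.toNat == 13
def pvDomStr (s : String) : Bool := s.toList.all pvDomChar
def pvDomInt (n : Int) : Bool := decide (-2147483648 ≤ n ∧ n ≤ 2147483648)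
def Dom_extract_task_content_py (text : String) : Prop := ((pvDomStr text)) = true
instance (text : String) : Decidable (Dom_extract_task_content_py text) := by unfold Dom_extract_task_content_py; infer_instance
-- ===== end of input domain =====

-- B replaces A's interleaved continue/break loop by find-cutoff-then-filter (alternative decomposition, same cost).
-- Both ports work on List Char lines via PySem.Chars (the PySem string primitives are defined there).

-- ===== PORT A =====
-- the for-loop with continue (session_key / ---) and break (the three markers), as structural recursion
def pyA_loop : List (List Char) → List (List Char)
  | [] => []
  | l :: rest =>
    if PySem.Chars.isIn "session_key:".toList (PySem.Chars.lower l) then pyA_loop rest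
    else if PySem.Chars.startswith (PySem.Chars.strip l) "---".toList then pyA_loop rest
    else if PySem.Chars.startswith (PySem.Chars.strip l) "CONTEXT FILES".toList then []
    else if PySem.Chars.startswith (PySem.Chars.strip l) "WORKING DIRECTORY".toList then []
    else if PySem.Chars.startswith (PySem.Chars.strip l) "SYSTEM INFO".toList then []
    else l :: pyA_loop rest

def extract_task_content_py (text : String) : String :=
  let lines := PySem.Chars.splitOn text.toList "\n".toList
  String.ofList (PySem.Chars.strip (PySem.Chars.join "\n".toList (pyA_loop lines)))

-- ===== PORT B =====
def bSkipped (l : List Char) : Bool :=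
  PySem.Chars.isIn "session_key:".toList (PySem.Chars.lower l) ||
    PySem.Chars.startswith (PySem.Chars.strip l) "---".toList

def bMarker (l : List Char) : Bool :=
  PySem.Chars.startswith (PySem.Chars.strip l) "CONTEXT FILES".toList ||
    PySem.Chars.startswith (PySem.Chars.strip l) "WORKING DIRECTORY".toList ||
    PySem.Chars.startswith (PySem.Chars.strip l) "SYSTEM INFO".toList

def extract_task_content_py_alt (text : String) : String :=
  let lines := PySem.Chars.splitOn text.toList "\n".toList
  -- next((i for i, line in enumerate(lines) if marker(line) and not skipped(line)), len(lines))
  let cutoff := (lines.findIdx? (fun l => bMarker l && !bSkipped l)).getD lines.length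
  let kept := (lines.take cutoff).filter (fun l => !bSkipped l)
  String.ofList (PySem.Chars.strip (PySem.Chars.join "\n".toList kept))

-- ===== PRECONDITION & SPEC =====
def Spec_extract_task_content_py (text : String) (out : String) : Prop := out = extract_task_content_py_alt text
instance (text : String) (out : String) : Decidable (Spec_extract_task_content_py text out) := by unfold Spec_extract_task_content_py; infer_instance

-- ===== CLAIM (what is proved, stated in full; the proofs are below) =====
def Claim_equal_extract_task_content_py : Prop := ∀ (text : String), Dom_extract_task_content_py text → Spec_extract_task_content_py text (extract_task_content_py text)

-- ===== LEMMAS AND PROOFS =====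
lemma pyA_loop_eq_cutoff_filter (ls : List (List Char)) :
    pyA_loop ls =
      (ls.take ((ls.findIdx? (fun l => bMarker l && !bSkipped l)).getD ls.length)).filter
        (fun l => !bSkipped l) := by
  induction ls with
  | nil => rfl
  | cons l rest ih =>
    rw [List.findIdx?_cons]
    by_cases h1 : PySem.Chars.isIn "session_key:".toList (PySem.Chars.lower l) = true
    · have hsk : bSkipped l = true := by unfold bSkipped; rw [h1]; simp
      have hp : (bMarker l && !bSkipped l) = false := by simp [hsk]
      rw [hp, pyA_loop, if_pos h1]
      simp [hsk, ih]
    · have h1' : PySem.Chars.isIn "session_key:".toList (PySem.Chars.lower l) = false := by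
        simpa using h1
      by_cases h2 : PySem.Chars.startswith (PySem.Chars.strip l) "---".toList = true
      · have hsk : bSkipped l = true := by unfold bSkipped; rw [h2]; simp
        have hp : (bMarker l && !bSkipped l) = false := by simp [hsk]
        rw [hp, pyA_loop, if_neg h1, if_pos h2]
        simp [hsk, ih]
      · have h2' : PySem.Chars.startswith (PySem.Chars.strip l) "---".toList = false := by
          simpa using h2
        have hsk : bSkipped l = false := by unfold bSkipped; rw [h1', h2']; rfl
        by_cases hc : PySem.Chars.startswith (PySem.Chars.strip l) "CONTEXT FILES".toList = true
        · have hp : (bMarker l && !bSkipped l) = true := by unfold bMarker; rw [hc, hsk]; simp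
          rw [hp, pyA_loop, if_neg h1, if_neg h2, if_pos hc]
          simp
        · by_cases hw : PySem.Chars.startswith (PySem.Chars.strip l) "WORKING DIRECTORY".toList = true
          · have hp : (bMarker l && !bSkipped l) = true := by unfold bMarker; rw [hw, hsk]; simp
            rw [hp, pyA_loop, if_neg h1, if_neg h2, if_neg hc, if_pos hw]
            simp
          · by_cases hs : PySem.Chars.startswith (PySem.Chars.strip l) "SYSTEM INFO".toList = true
            · have hp : (bMarker l && !bSkipped l) = true := by unfold bMarker; rw [hs, hsk]; simp
              rw [hp, pyA_loop, if_neg h1, if_neg h2, if_neg hc, if_neg hw, if_pos hs]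
              simp
            · have hc' : PySem.Chars.startswith (PySem.Chars.strip l) "CONTEXT FILES".toList = false := by simpa using hc
              have hw' : PySem.Chars.startswith (PySem.Chars.strip l) "WORKING DIRECTORY".toList = false := by simpa using hw
              have hs' : PySem.Chars.startswith (PySem.Chars.strip l) "SYSTEM INFO".toList = false := by simpa using hs
              have hm : bMarker l = false := by unfold bMarker; rw [hc', hw', hs']; rfl
              have hp : (bMarker l && !bSkipped l) = false := by simp [hm]
              rw [hp, pyA_loop, if_neg h1, if_neg h2, if_neg hc, if_neg hw, if_neg hs]
              simp [hsk, ih]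

-- ===== VERDICT (by name: the statement is the Claim_ definition above) =====
theorem extract_task_content_py_spec : Claim_equal_extract_task_content_py := by
  intro text _
  unfold Spec_extract_task_content_py
  simp [extract_task_content_py, extract_task_content_py_alt, pyA_loop_eq_cutoff_filter]
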